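-- pv_equiv track=rewrite | github.com/udofia2/notion-newsroom | src/newsroom/notion/sync_archive.py | _wrap_list_items
-- ===== SOURCE A (Python) =====
-- def _wrap_list_items(fragments: list[str]) -> list[str]:
--     out: list[str] = []
--     in_list = False
--     for fragment in fragments:
--         is_li = fragment.startswith("<li>")
--         if is_li and not in_list:
--             out.append("<ul>")
--             in_list = True
--         if not is_li and in_list:
--             out.append("</ul>")
--             in_list = False
--         out.append(fragment)
--     if in_list:
--         out.append("</ul>")
--     return out
-- ===== SOURCE B (Python) =====
-- def _wrap_list_items(fragments: list[str]) -> list[str]: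
--     out: list[str] = []
--     i = 0
--     n = len(fragments)
--     while i < n:
--         k = fragments[i].startswith("<li>")
--         j = i + 1
--         while j < n and fragments[j].startswith("<li>") == k:
--             j += 1
--         run = fragments[i:j]
--         if k:
--             out.append("<ul>")
--             out.extend(run)
--             out.append("</ul>")
--         else:
--             out.extend(run)
--         i = j
--     return out
-- ===== Notes on version B (the rewrite author's own statement) =====
-- stated objective: idiomatic
-- what changed: Replaces the in_list flag with per-item transition branches by a group-then-wrap pass: split fragments into maximal runs of same startswith('<li>') key, then emit each run wrapped in <ul>/</ul> if it is a <li> run.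
import Mathlib
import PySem

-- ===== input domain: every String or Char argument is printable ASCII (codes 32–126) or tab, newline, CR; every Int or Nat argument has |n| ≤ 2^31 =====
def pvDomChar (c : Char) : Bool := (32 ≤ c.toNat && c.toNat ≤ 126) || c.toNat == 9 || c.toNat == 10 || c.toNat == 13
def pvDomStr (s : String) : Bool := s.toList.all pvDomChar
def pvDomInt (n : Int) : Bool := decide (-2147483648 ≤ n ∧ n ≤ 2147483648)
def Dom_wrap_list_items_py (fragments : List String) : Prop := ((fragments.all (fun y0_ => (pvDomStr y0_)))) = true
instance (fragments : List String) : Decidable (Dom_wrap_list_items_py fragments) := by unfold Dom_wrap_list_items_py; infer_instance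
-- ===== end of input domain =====

-- B replaces A's in_list flag and per-item transition branches by a group-then-wrap pass
-- over maximal runs of equal startswith("<li>") key (idiomatic restructuring, same cost).

-- ===== PORT A =====
-- one step of A's for-loop over state (out, in_list)
def pvStepA (acc : List String × Bool) (fragment : String) : List String × Bool :=
  let is_li := PySem.Str.startswith fragment "<li>"
  let acc := if is_li && !acc.2 then (acc.1 ++ ["<ul>"], true) else acc
  let acc := if !is_li && acc.2 then (acc.1 ++ ["</ul>"], false) else acc
  (acc.1 ++ [fragment], acc.2)

def wrap_list_items_py (fragments : List String) : List String :=
  let st := fragments.foldl pvStepA ([], false)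
  if st.2 then st.1 ++ ["</ul>"] else st.1

-- ===== PORT B =====
-- inner while loop of B: take the leading run of elements with key k, return (run, rest)
def pvRun (k : Bool) : List String → List String × List String
  | [] => ([], [])
  | f :: rest =>
    if PySem.Str.startswith f "<li>" == k then
      let p := pvRun k rest
      (f :: p.1, p.2)
    else ([], f :: rest)

theorem pvRun_len (k : Bool) : ∀ l : List String, (pvRun k l).2.length ≤ l.length := by
  intro l
  induction l with
  | nil => simp [pvRun]
  | cons f rest ih =>
    simp only [pvRun]
    split
    · simpa using Nat.le_succ_of_le ih
    · simp

-- outer while loop of B: emit each run, wrapped if it is a <li> run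
def wrap_list_items_py_alt (fragments : List String) : List String :=
  match fragments with
  | [] => []
  | f :: rest =>
    let k := PySem.Str.startswith f "<li>"
    let p := pvRun k rest
    (if k then "<ul>" :: (f :: p.1) ++ ["</ul>"] else f :: p.1) ++ wrap_list_items_py_alt p.2
termination_by fragments.length
decreasing_by
  simpa using Nat.lt_succ_of_le (pvRun_len _ rest)

-- ===== PRECONDITION & SPEC =====
def Spec_wrap_list_items_py (fragments : List String) (out : List String) : Prop := out = wrap_list_items_py_alt fragments
instance (fragments : List String) (out : List String) : Decidable (Spec_wrap_list_items_py fragments out) := by unfold Spec_wrap_list_items_py; infer_instance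

-- ===== CLAIM (what is proved, stated in full; the proofs are below) =====
def Claim_equal_wrap_list_items_py : Prop := ∀ (fragments : List String), Dom_wrap_list_items_py fragments → Spec_wrap_list_items_py fragments (wrap_list_items_py fragments)

-- ===== LEMMAS AND PROOFS =====

def pvFinish (p : List String × Bool) : List String :=
  if p.2 then p.1 ++ ["</ul>"] else p.1

-- a leading run of non-<li> fragments is absorbed into B's first group
theorem alt_false_run (l : List String) :
    wrap_list_items_py_alt l = (pvRun false l).1 ++ wrap_list_items_py_alt (pvRun false l).2 := by
  cases l with
  | nil => simp [pvRun, wrap_list_items_py_alt]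
  | cons f rest =>
    by_cases h : PySem.Chars.startswith f.toList ['<', 'l', 'i', '>'] = true
    · rw [pvRun]
      simp [h]
    · simp only [Bool.not_eq_true] at h
      rw [wrap_list_items_py_alt, pvRun]
      simp [PySem.Str.startswith, h]

-- combined invariant for A's loop from the two reachable states
theorem loop_inv (n : Nat) : ∀ l : List String, l.length ≤ n →
    (∀ out : List String,
      pvFinish (l.foldl pvStepA (out, false)) = out ++ wrap_list_items_py_alt l) ∧
    (∀ out : List String,
      pvFinish (l.foldl pvStepA (out, true)) =
        out ++ (pvRun true l).1 ++ ["</ul>"] ++ wrap_list_items_py_alt (pvRun true l).2) := by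
  induction n with
  | zero =>
    intro l hl
    have : l = [] := List.eq_nil_of_length_eq_zero (Nat.le_zero.mp hl)
    subst this
    simp [pvFinish, wrap_list_items_py_alt, pvRun]
  | succ n ih =>
    intro l hl
    cases l with
    | nil => simp [pvFinish, wrap_list_items_py_alt, pvRun]
    | cons f rest =>
      have hr : rest.length ≤ n := Nat.le_of_succ_le_succ hl
      constructor
      · intro out
        by_cases h : PySem.Chars.startswith f.toList ['<', 'l', 'i', '>'] = true
        · -- open a list: emit "<ul>" and f, continue in state true
          have := (ih rest hr).2 (out ++ ["<ul>", f])
          rw [List.foldl_cons]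
          simp only [pvStepA, PySem.Str.startswith]
          simp [h]
          simp at this
          rw [this, wrap_list_items_py_alt]
          simp [PySem.Str.startswith, h]
        · -- stay outside a list
          simp only [Bool.not_eq_true] at h
          have := (ih rest hr).1 (out ++ [f])
          rw [List.foldl_cons]
          simp only [pvStepA, PySem.Str.startswith]
          simp [h]
          simp at this
          rw [this]
          conv_rhs => rw [alt_false_run (f :: rest)]
          rw [pvRun]
          simp [PySem.Str.startswith, h, alt_false_run rest]
      · intro out
        by_cases h : PySem.Chars.startswith f.toList ['<', 'l', 'i', '>'] = true
        · -- continue the run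
          have := (ih rest hr).2 (out ++ [f])
          rw [List.foldl_cons]
          simp only [pvStepA, PySem.Str.startswith]
          simp [h]
          simp at this
          rw [this, pvRun]
          simp [PySem.Str.startswith, h]
        · -- close the run: emit "</ul>" then f, continue in state false
          simp only [Bool.not_eq_true] at h
          have := (ih rest hr).1 (out ++ ["</ul>", f])
          rw [List.foldl_cons]
          simp only [pvStepA, PySem.Str.startswith]
          simp [h]
          simp at this
          rw [this]
          conv_rhs => rw [pvRun]
          simp [PySem.Str.startswith, h]
          rw [alt_false_run (f :: rest)]
          conv_rhs => rw [pvRun]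
          simp [PySem.Str.startswith, h]
          rw [alt_false_run rest]

-- ===== VERDICT (by name: the statement is the Claim_ definition above) =====
theorem wrap_list_items_py_spec : Claim_equal_wrap_list_items_py := by
  intro fragments _
  unfold Spec_wrap_list_items_py wrap_list_items_py
  have := (loop_inv fragments.length fragments (le_refl _)).1 []
  simpa [pvFinish] using this
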